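-- pv_equiv track=rewrite | github.com/uark-self-assembly/oxdna-tile-binding | pyoxdna/utils.py | chain_configs
-- ===== SOURCE A (Python) =====
-- def chain_configs(config_list, name_list, name_prefix, input_top, input_conf):
--     # Arguments:
--     #   name_list is a list of stage names, e.g. ['relax1', 'relax2', 'test', 'md-sim']
--     #   config_list is a list of config dicts, e.g. those created from 'min.conf', 'relax.conf', 'molecular-dynamics.conf', and 'molecular-dynamics.conf'
--     #   name_prefix is the prefix that should begin the names of all output files
--     # The first simulation in the list takes input_top and input_conf as inputs.
--     # Each stage outputs a last configuration (.conf) and trajectory file (.dat).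
--     # Each stage takes as input the output configuration of the previous stage.
--     # All stages take the same topology file as input.
--
--     assert len(config_list) == len(name_list), f"In chain_conigs, lengths of config_list and name_list don't match: config_list = {config_list}, name_list = {name_list}"
--     for name, config in zip(name_list, config_list):
--
--         config['topology'] = input_top
--         config['conf_file'] = input_conf
--
--         out_conf = name_prefix + "-" + name + ".conf"
--         out_traj = name_prefix + "-" + name + ".dat"
--
--         config['lastconf_file'] = out_conf
--         config['trajectory_file'] = out_traj
--
--         input_conf = out_conf
--
--     return config_list
-- ===== SOURCE B (Python) =====
-- # B: precompute the output conf names, derive the input confs by shifting, then one zip pass.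
-- # Like A, mutates the config dicts in place and returns the same list object.
-- def chain_configs(config_list, name_list, name_prefix, input_top, input_conf):
--     assert len(config_list) == len(name_list), f"In chain_conigs, lengths of config_list and name_list don't match: config_list = {config_list}, name_list = {name_list}"
--     outs = [name_prefix + "-" + n + ".conf" for n in name_list]
--     ins = [input_conf] + outs[:-1]
--     for config, name, in_conf, out_conf in zip(config_list, name_list, ins, outs):
--         config['topology'] = input_top
--         config['conf_file'] = in_conf
--         config['lastconf_file'] = out_conf
--         config['trajectory_file'] = name_prefix + "-" + name + ".dat"
--     return config_list
-- ===== Notes on version B (the rewrite author's own statement) =====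
-- stated objective: alternative
-- what changed: Instead of threading input_conf through the loop as mutable state, B precomputes the list of output conf names, derives the input conf names by shifting that list, and does one stateless zip pass over four parallel lists.
import Mathlib
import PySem

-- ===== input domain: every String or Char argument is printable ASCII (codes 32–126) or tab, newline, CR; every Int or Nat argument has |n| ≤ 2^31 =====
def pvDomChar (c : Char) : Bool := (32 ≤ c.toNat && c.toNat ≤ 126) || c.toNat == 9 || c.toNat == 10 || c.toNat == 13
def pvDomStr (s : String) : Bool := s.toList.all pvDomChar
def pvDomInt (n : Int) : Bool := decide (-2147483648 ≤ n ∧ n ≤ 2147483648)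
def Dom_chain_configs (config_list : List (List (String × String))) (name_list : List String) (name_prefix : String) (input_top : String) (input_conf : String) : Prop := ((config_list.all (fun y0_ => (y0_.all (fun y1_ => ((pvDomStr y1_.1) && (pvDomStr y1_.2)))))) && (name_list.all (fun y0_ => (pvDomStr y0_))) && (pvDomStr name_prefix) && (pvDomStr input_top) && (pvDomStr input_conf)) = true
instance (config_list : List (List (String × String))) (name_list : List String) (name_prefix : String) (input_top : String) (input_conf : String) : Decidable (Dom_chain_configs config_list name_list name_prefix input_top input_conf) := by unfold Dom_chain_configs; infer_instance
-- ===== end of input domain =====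

-- B replaces A's mutable input_conf threading with a precomputed shifted list and one zip pass;
-- objective: alternative decomposition. Like A, the Python versions mutate the dicts in place and
-- return the same list; the theorems here are about the returned value.

-- ===== PORT A =====
-- config[k] = v on an insertion-ordered dict represented as an association list
def pvDset (cfg : List (String × String)) (k v : String) : List (String × String) :=
  ((PySem.Dict.mk cfg).insert k v).items

-- the 'for name, config in zip(name_list, config_list)' loop, input_conf threaded as state
def chain_configs_loop (name_prefix input_top : String)
    (pairs : List (String × List (String × String))) (input_conf : String) :
    List (List (String × String)) :=
  match pairs with
  | [] => []
  | (name, config) :: rest =>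
      let c1 := pvDset config "topology" input_top
      let c2 := pvDset c1 "conf_file" input_conf
      let out_conf := name_prefix ++ "-" ++ name ++ ".conf"
      let out_traj := name_prefix ++ "-" ++ name ++ ".dat"
      let c3 := pvDset c2 "lastconf_file" out_conf
      let c4 := pvDset c3 "trajectory_file" out_traj
      c4 :: chain_configs_loop name_prefix input_top rest out_conf

def chain_configs (config_list : List (List (String × String))) (name_list : List String) (name_prefix : String) (input_top : String) (input_conf : String) : List (List (String × String)) :=
  chain_configs_loop name_prefix input_top (name_list.zip config_list) input_conf

-- ===== PORT B =====
def chain_configs_alt (config_list : List (List (String × String))) (name_list : List String) (name_prefix : String) (input_top : String) (input_conf : String) : List (List (String × String)) :=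
  let outs := name_list.map (fun n => name_prefix ++ "-" ++ n ++ ".conf")
  let ins := input_conf :: PySem.List.slice outs none (some (-1))
  ((config_list.zip name_list).zip (ins.zip outs)).map (fun p =>
    pvDset (pvDset (pvDset (pvDset p.1.1 "topology" input_top)
      "conf_file" p.2.1) "lastconf_file" p.2.2)
      "trajectory_file" (name_prefix ++ "-" ++ p.1.2 ++ ".dat"))

-- ===== PRECONDITION & SPEC =====
-- A asserts len(config_list) == len(name_list); Pre_ excludes exactly the mismatched lengths.
def Pre_chain_configs (config_list : List (List (String × String))) (name_list : List String) (name_prefix : String) (input_top : String) (input_conf : String) : Prop :=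
  config_list.length = name_list.length
instance (config_list : List (List (String × String))) (name_list : List String) (name_prefix : String) (input_top : String) (input_conf : String) : Decidable (Pre_chain_configs config_list name_list name_prefix input_top input_conf) := by unfold Pre_chain_configs; infer_instance

def pvWitness_chain_configs : (List (List (String × String))) × List String × String × String × String :=
  ([[("x", "1")], []], ["r1", "md"], "pre", "top.top", "in.conf")

def Spec_chain_configs (config_list : List (List (String × String))) (name_list : List String) (name_prefix : String) (input_top : String) (input_conf : String) (out : List (List (String × String))) : Prop := out = chain_configs_alt config_list name_list name_prefix input_top input_conf
instance (config_list : List (List (String × String))) (name_list : List String) (name_prefix : String) (input_top : String) (input_conf : String) (out : List (List (String × String))) : Decidable (Spec_chain_configs config_list name_list name_prefix input_top input_conf out) := by unfold Spec_chain_configs; infer_instance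

-- ===== CLAIM (what is proved, stated in full; the proofs are below) =====
def Claim_equal_chain_configs : Prop := ∀ (config_list : List (List (String × String))) (name_list : List String) (name_prefix : String) (input_top : String) (input_conf : String), Dom_chain_configs config_list name_list name_prefix input_top input_conf → Pre_chain_configs config_list name_list name_prefix input_top input_conf → Spec_chain_configs config_list name_list name_prefix input_top input_conf (chain_configs config_list name_list name_prefix input_top input_conf)

-- ===== LEMMAS AND PROOFS =====
theorem pv_slice_cons_neg_one {α : Type} (x y : α) (ys : List α) :
    PySem.List.slice (x :: y :: ys) none (some (-1))
      = x :: PySem.List.slice (y :: ys) none (some (-1)) := by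
  have h1 : PySem.List.slice (x :: y :: ys) none (some (-1))
      = (x :: y :: ys).take ((x :: y :: ys).length - 1) := by
    simpa using PySem.List.slice_to_neg_natCast (x :: y :: ys) (k := 1) (by omega)
  have h2 : PySem.List.slice (y :: ys) none (some (-1))
      = (y :: ys).take ((y :: ys).length - 1) := by
    simpa using PySem.List.slice_to_neg_natCast (y :: ys) (k := 1) (by omega)
  rw [h1, h2]
  simp [List.take_succ_cons]

theorem pv_loop_cons (np it name ic : String) (config : List (String × String))
    (rest : List (String × List (String × String))) :
    chain_configs_loop np it ((name, config) :: rest) ic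
      = pvDset (pvDset (pvDset (pvDset config "topology" it) "conf_file" ic)
          "lastconf_file" (np ++ "-" ++ name ++ ".conf"))
          "trajectory_file" (np ++ "-" ++ name ++ ".dat")
        :: chain_configs_loop np it rest (np ++ "-" ++ name ++ ".conf") := rfl

theorem chain_loop_eq (np it : String) (nl : List String) (cl : List (List (String × String)))
    (ic : String) (h : cl.length = nl.length) :
    chain_configs_loop np it (nl.zip cl) ic
      = ((cl.zip nl).zip ((ic :: PySem.List.slice (nl.map (fun n => np ++ "-" ++ n ++ ".conf")) none (some (-1))).zip (nl.map (fun n => np ++ "-" ++ n ++ ".conf")))).map (fun p =>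
          pvDset (pvDset (pvDset (pvDset p.1.1 "topology" it)
            "conf_file" p.2.1) "lastconf_file" p.2.2)
            "trajectory_file" (np ++ "-" ++ p.1.2 ++ ".dat")) := by
  induction nl generalizing cl ic with
  | nil =>
      cases cl with
      | nil => rfl
      | cons c cl' => simp at h
  | cons n nl' ih =>
      cases cl with
      | nil => simp at h
      | cons c cl' =>
          simp only [List.length_cons, Nat.add_right_cancel_iff] at h
          cases nl' with
          | nil =>
              cases cl' with
              | nil => rfl
              | cons _ _ => simp at h
          | cons n2 nl'' =>
              cases cl' with
              | nil => simp at h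
              | cons c2 cl'' =>
                  simp only [List.zip_cons_cons, List.map_cons, pv_slice_cons_neg_one]
                  rw [pv_loop_cons]
                  refine List.cons_eq_cons.mpr ⟨rfl, ?_⟩
                  simpa using ih (c2 :: cl'') (np ++ "-" ++ n ++ ".conf") h

-- ===== VERDICT (by name: the statement is the Claim_ definition above) =====
theorem chain_configs_spec : Claim_equal_chain_configs := by
  intro cl nl np it ic _hd hpre
  unfold Spec_chain_configs chain_configs chain_configs_alt
  exact chain_loop_eq np it nl cl ic hpre
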